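-- pv_equiv track=rewrite | github.com/hgparker/project_euler | Problem32a.py | acceptable
-- ===== SOURCE A (Python) =====
-- def acceptable(unavailable, product):
--   alsoUnavailable = set()
--   while product > 0:
--     digit = product % 10
--     if digit in unavailable or digit in alsoUnavailable or digit == 0:
--       return False
--     alsoUnavailable.add(digit)
--     product //= 10
--   return True
-- ===== SOURCE B (Python) =====
-- def acceptable(unavailable, product):
--     if product <= 0:
--         return True
--     s = str(product)
--     if len(set(s)) != len(s):
--         return False
--     return all(c != '0' and int(c) not in unavailable for c in s)
-- ===== Notes on version B (the rewrite author's own statement) =====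
-- stated objective: alternative
-- what changed: B works on the decimal string of the product instead of a mod/div arithmetic loop: it converts once with str(), tests character uniqueness by one whole-string set-size comparison, and scans the characters once for '0' or unavailable digits, where A extracts digits arithmetically while maintaining an incremental running set with an early return.
import Mathlib
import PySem

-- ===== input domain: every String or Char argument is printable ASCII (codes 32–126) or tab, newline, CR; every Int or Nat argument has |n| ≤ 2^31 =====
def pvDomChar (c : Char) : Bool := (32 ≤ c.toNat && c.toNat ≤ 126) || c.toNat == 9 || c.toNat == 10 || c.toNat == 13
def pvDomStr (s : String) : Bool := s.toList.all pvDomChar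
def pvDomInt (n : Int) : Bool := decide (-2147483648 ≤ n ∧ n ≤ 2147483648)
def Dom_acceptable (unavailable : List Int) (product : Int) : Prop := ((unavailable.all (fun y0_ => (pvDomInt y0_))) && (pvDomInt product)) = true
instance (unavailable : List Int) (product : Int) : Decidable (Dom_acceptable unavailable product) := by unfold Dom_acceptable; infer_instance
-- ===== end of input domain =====

-- B converts the product to its decimal string once and checks that string (set-size
-- uniqueness test, one scan for '0'/unavailable) instead of A's arithmetic mod/div
-- loop with an incremental running set (alternative decomposition, same cost).


-- ===== PORT A =====
-- A's while loop, carrying the running set `alsoUnavailable`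
def acceptableLoop (unavailable : List Int) (product : Int) (alsoUnavailable : PySem.Set Int) : Bool :=
  if _h : product > 0 then
    let digit := PySem.Int.mod product 10
    if unavailable.contains digit || PySem.Set.contains alsoUnavailable digit || digit == 0 then
      false
    else
      acceptableLoop unavailable (PySem.Int.floordiv product 10) (PySem.Set.add alsoUnavailable digit)
  else
    true
termination_by product.toNat
decreasing_by
  rw [PySem.Int.floordiv_eq_ediv_of_pos (by norm_num : (0:Int) < 10)]
  omega

def acceptable (unavailable : List Int) (product : Int) : Bool :=
  acceptableLoop unavailable product PySem.Set.empty

-- ===== PORT B =====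
-- Source B: early True for product <= 0 (A's loop does not run), then the decimal string.
-- `int(c)` is ported as `(PySem.Int.ofChars? [c]).getD 0`; on the digit characters of
-- str(product) for product > 0 the option is always `some`, so the default is never used.
def acceptable_alt (unavailable : List Int) (product : Int) : Bool :=
  if product ≤ 0 then
    true
  else
    let cs := (PySem.Int.toStr product).toList      -- the characters of str(product)
    if !(PySem.Set.len (PySem.Set.ofList cs) == (cs.length : Int)) then
      false
    else
      cs.all (fun c => c != '0' && !(unavailable.contains ((PySem.Int.ofChars? [c]).getD 0)))

-- ===== PRECONDITION & SPEC =====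
def Spec_acceptable (unavailable : List Int) (product : Int) (out : Bool) : Prop := out = acceptable_alt unavailable product
instance (unavailable : List Int) (product : Int) (out : Bool) : Decidable (Spec_acceptable unavailable product out) := by unfold Spec_acceptable; infer_instance

-- ===== CLAIM (what is proved, stated in full; the proofs are below) =====
def Claim_equal_acceptable : Prop := ∀ (unavailable : List Int) (product : Int), Dom_acceptable unavailable product → Spec_acceptable unavailable product (acceptable unavailable product)

-- ===== LEMMAS AND PROOFS =====

-- A's digits, least significant first (proof-side recursion mirroring A's loop).
def digitsOf (product : Int) : List Int :=
  if _h : product > 0 then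
    PySem.Int.mod product 10 :: digitsOf (PySem.Int.floordiv product 10)
  else
    []
termination_by product.toNat
decreasing_by
  rw [PySem.Int.floordiv_eq_ediv_of_pos (by norm_num : (0:Int) < 10)]
  omega

-- A's loop returns true iff the remaining digits are pairwise distinct and each is
-- nonzero, not in `unavailable` and not in the running set.
theorem acceptableLoop_eq_true_iff (unavailable : List Int) (product : Int) (s : PySem.Set Int) :
    acceptableLoop unavailable product s = true ↔
      ((digitsOf product).Nodup ∧
        ∀ d ∈ digitsOf product, d ∉ unavailable ∧ d ∉ s ∧ d ≠ 0) := by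
  fun_induction acceptableLoop unavailable product s with
  | case1 product s h digit hbad =>
      rw [digitsOf]
      simp only [h, dif_pos, Bool.false_eq_true, false_iff, List.nodup_cons, List.mem_cons]
      simp only [Bool.or_eq_true, List.contains_eq_mem, decide_eq_true_eq, beq_iff_eq,
        PySem.Set.contains_iff] at hbad
      intro ⟨hnd, hall⟩
      have := hall digit (Or.inl rfl)
      tauto
  | case2 product s h digit hok ih =>
      rw [digitsOf]
      simp only [h, dif_pos, List.nodup_cons, List.mem_cons, ih]
      simp only [Bool.or_eq_true, List.contains_eq_mem, decide_eq_true_eq, beq_iff_eq,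
        not_or, PySem.Set.contains_iff] at hok
      obtain ⟨⟨hu0, hs0⟩, hz0⟩ := hok
      constructor
      · rintro ⟨hnd, hall⟩
        refine ⟨⟨?_, hnd⟩, ?_⟩
        · intro hmem
          have := (hall digit hmem).2.1
          rw [PySem.Set.mem_add] at this
          exact this (Or.inr rfl)
        · rintro d (rfl | hd)
          · exact ⟨hu0, hs0, hz0⟩
          · have := hall d hd
            simp only [PySem.Set.mem_add, not_or] at this
            exact ⟨this.1, this.2.1.1, this.2.2⟩
      · rintro ⟨⟨hdig, hnd⟩, hall⟩
        refine ⟨hnd, ?_⟩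
        intro d hd
        have hthis := hall d (Or.inr hd)
        refine ⟨hthis.1, ?_, hthis.2.2⟩
        simp only [PySem.Set.mem_add, not_or]
        exact ⟨hthis.2.1, fun e => hdig (by simp only [digit] at e; rw [← e]; exact hd)⟩
  | case3 product s h =>
      rw [digitsOf]
      simp [h]

-- B's set-size test is exactly Nodup of the character list.
theorem len_ofList_eq_iff_nodup {α : Type} [BEq α] [LawfulBEq α] (xs : List α) :
    PySem.Set.len (PySem.Set.ofList xs) = (xs.length : Int) ↔ xs.Nodup := by
  classical
  simp only [PySem.Set.len, Int.natCast_inj]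
  constructor
  · intro h
    have hfin : (PySem.Set.ofList xs).toFinset = xs.toFinset := by
      ext y
      simp [PySem.Set.mem_ofList]
    have hcard : xs.toFinset.card = xs.length := by
      rw [← hfin, List.toFinset_card_of_nodup (PySem.Set.nodup_ofList xs), h]
    by_contra hnd
    have h1 : xs.dedup.length < xs.length := by
      have hle := (List.dedup_sublist xs).subperm.length_le
      rcases lt_or_eq_of_le hle with h2 | h2
      · exact h2
      · exact absurd ((List.Sublist.eq_of_length (List.dedup_sublist xs) h2) ▸ xs.nodup_dedup)
          hnd
    rw [← List.card_toFinset] at h1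
    omega
  · intro h
    rw [PySem.Set.ofList_eq_self_of_nodup xs h]

-- digitsOf agrees with Mathlib's Nat.digits.
theorem digitsOf_eq_digits (product : Int) :
    digitsOf product = (Nat.digits 10 product.toNat).map (Nat.cast : Nat → Int) := by
  fun_induction digitsOf product with
  | case1 product h ih =>
      rw [Nat.digits_def' (by norm_num : 1 < 10) (by omega : 0 < product.toNat),
        List.map_cons]
      have h1 : PySem.Int.mod product 10 = ((product.toNat % 10 : Nat) : Int) := by
        rw [PySem.Int.mod_eq_emod_of_pos (by norm_num : (0:Int) < 10)]
        omega
      have h2 : (PySem.Int.floordiv product 10).toNat = product.toNat / 10 := by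
        rw [PySem.Int.floordiv_eq_ediv_of_pos (by norm_num : (0:Int) < 10)]
        omega
      rw [h1, ← h2, ih]
  | case2 product h =>
      have : product.toNat = 0 := by omega
      simp [this]

-- every digit of Nat.digits 10 is < 10 (alias for the Mathlib fact, in the form used below)
theorem digits_lt_ten (n : Nat) : ∀ d ∈ Nat.digits 10 n, d < 10 :=
  fun _ hd => Nat.digits_lt_base (by norm_num) hd

-- fuel-generic characterisation of core's Nat.toDigitsCore at base 10
theorem toDigitsCore_eq (f : Nat) : ∀ (n : Nat) (l : List Char), 0 < n → n < f →
    Nat.toDigitsCore 10 f n l = ((Nat.digits 10 n).map Nat.digitChar).reverse ++ l := by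
  induction f with
  | zero => intro n l h1 h2; omega
  | succ f ih =>
      intro n l h1 h2
      rw [Nat.toDigitsCore]
      rw [Nat.digits_def' (by norm_num : 1 < 10) h1]
      by_cases hq : n / 10 = 0
      · have he : Nat.digits 10 (n / 10) = [] := by rw [hq]; simp
        rw [if_pos hq, he]
        simp
      · have hlt : n / 10 < f := by omega
        rw [if_neg hq, ih (n / 10) _ (by omega) hlt]
        simp

-- str(product) for product > 0: the digit characters, most significant first.
theorem toChars_pos (product : Int) (h : 0 < product) :
    PySem.Int.toChars product =
      ((Nat.digits 10 product.toNat).map Nat.digitChar).reverse := by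
  rw [PySem.Int.toChars, if_neg (by omega)]
  show Nat.toDigits 10 product.toNat = _
  rw [Nat.toDigits, toDigitsCore_eq (product.toNat + 1) product.toNat [] (by omega) (by omega)]
  simp

-- the three per-digit facts, for d < 10
theorem digitChar_inj (d k : Nat) (hd : d < 10) (hk : k < 10) :
    Nat.digitChar d = Nat.digitChar k → d = k := by
  interval_cases d <;> interval_cases k <;> simp_all <;> decide

theorem digitChar_eq_zeroChar (d : Nat) (hd : d < 10) :
    Nat.digitChar d = '0' ↔ d = 0 := by
  interval_cases d <;> decide

theorem ofChars_digitChar (d : Nat) (hd : d < 10) :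
    PySem.Int.ofChars? [Nat.digitChar d] = some (d : Int) := by
  interval_cases d <;> decide

-- A's condition over the natural digit list
theorem acceptable_eq_true_iff (unavailable : List Int) (product : Int) :
    acceptable unavailable product = true ↔
      ((Nat.digits 10 product.toNat).Nodup ∧
        ∀ d ∈ Nat.digits 10 product.toNat, (d : Int) ∉ unavailable ∧ d ≠ 0) := by
  unfold acceptable
  rw [acceptableLoop_eq_true_iff, digitsOf_eq_digits]
  have hinj : Function.Injective (Nat.cast : Nat → Int) := fun a b h => by exact_mod_cast h
  constructor
  · rintro ⟨hnd, hall⟩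
    refine ⟨hnd.of_map _, fun d hd => ?_⟩
    have := hall (d : Int) (List.mem_map_of_mem hd)
    exact ⟨this.1, fun e => this.2.2 (by exact_mod_cast e)⟩
  · rintro ⟨hnd, hall⟩
    refine ⟨hnd.map hinj, ?_⟩
    rintro x hx
    obtain ⟨d, hd, rfl⟩ := List.mem_map.mp hx
    have := hall d hd
    refine ⟨this.1, by simp [PySem.Set.empty], fun e => this.2 (by exact_mod_cast e)⟩

-- B's condition over the natural digit list
theorem acceptable_alt_eq_true_iff (unavailable : List Int) (product : Int) (h : 0 < product) :
    acceptable_alt unavailable product = true ↔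
      ((Nat.digits 10 product.toNat).Nodup ∧
        ∀ d ∈ Nat.digits 10 product.toNat, (d : Int) ∉ unavailable ∧ d ≠ 0) := by
  unfold acceptable_alt
  rw [if_neg (by omega)]
  simp only [PySem.Int.toList_toStr, toChars_pos product h]
  set ds := Nat.digits 10 product.toNat with hds
  have hlt : ∀ d ∈ ds, d < 10 := hds ▸ digits_lt_ten _
  have hnd : ((PySem.Set.len (PySem.Set.ofList ((ds.map Nat.digitChar).reverse)) ==
      (((ds.map Nat.digitChar).reverse).length : Int)) = true) ↔ ds.Nodup := by
    rw [beq_iff_eq, len_ofList_eq_iff_nodup, List.nodup_reverse]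
    constructor
    · exact fun hn => hn.of_map _
    · exact fun hn => hn.map_on (fun a ha b hb =>
        digitChar_inj a b (hlt a ha) (hlt b hb))
  have hsc : (((ds.map Nat.digitChar).reverse).all
      (fun c => c != '0' && !(unavailable.contains ((PySem.Int.ofChars? [c]).getD 0))) = true) ↔
      (∀ d ∈ ds, (d : Int) ∉ unavailable ∧ d ≠ 0) := by
    simp only [List.all_eq_true, List.mem_reverse, List.mem_map, forall_exists_index, and_imp,
      Bool.and_eq_true, bne_iff_ne, Bool.not_eq_true', List.contains_eq_mem,
      decide_eq_false_iff_not]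
    constructor
    · intro hall d hd
      have := hall _ d hd rfl
      rw [ofChars_digitChar d (hlt d hd)] at this
      simp only [Option.getD_some] at this
      exact ⟨this.2, fun e => this.1 ((digitChar_eq_zeroChar d (hlt d hd)).mpr e)⟩
    · rintro hall c d hd rfl
      have := hall d hd
      rw [ofChars_digitChar d (hlt d hd)]
      simp only [Option.getD_some]
      exact ⟨fun e => this.2 ((digitChar_eq_zeroChar d (hlt d hd)).mp e), this.1⟩
  by_cases hc : (PySem.Set.len (PySem.Set.ofList ((ds.map Nat.digitChar).reverse)) ==
      (((ds.map Nat.digitChar).reverse).length : Int)) = true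
  · simp only [hc, Bool.not_true]
    simp only [Bool.false_eq_true, if_false]
    rw [hsc]
    have hn := hnd.mp hc
    exact ⟨fun h2 => ⟨hn, h2⟩, fun h2 => h2.2⟩
  · have hc' := Bool.eq_false_iff.mpr hc
    simp only [hc', Bool.not_false, if_true]
    simp only [Bool.false_eq_true, false_iff]
    rintro ⟨h1, -⟩
    exact hc (hnd.mpr h1)

-- ===== VERDICT (by name: the statement is the Claim_ definition above) =====
theorem acceptable_spec : Claim_equal_acceptable := by
  intro unavailable product _
  unfold Spec_acceptable
  by_cases hp : product ≤ 0
  · show acceptable unavailable product = _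
    unfold acceptable acceptable_alt
    rw [acceptableLoop, dif_neg (by omega), if_pos hp]
  · rw [Bool.eq_iff_iff, acceptable_eq_true_iff,
      acceptable_alt_eq_true_iff unavailable product (by omega)]
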